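-- pv_equiv track=rewrite | github.com/notCoderJ/Algorithm-Study | Binary_Search/Middle/make_rice_cake.py | recur_binary_search
-- ===== SOURCE A (Python) =====
-- def recur_binary_search(target, start, end, rice_cakes):
--     if start > end: # 절단기를 조절할 범위가 남지 않았으면 종료
--         return None
--
--     mid = (start + end) // 2
--
--     # 떡들을 절단기로 자르고 남은 부분들의 총 길이를 구한다
--     parts_sum = sum([rc - mid for rc in rice_cakes if rc > mid])
--     if target > parts_sum: # 요구한 길이보다 적게 남은 경우 절단기 높이를 줄인다(좌측에 대해 이진 탐색)
--         return binary_search(target, start, mid - 1, rice_cakes)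
--     else: # 요구한 길이보다 많이 남은 경우 절단기 높이를 높인다(우측에 대해 이진 탐색)
--         # 요구한 길이와 같거나 많이 남아야 하므로 절단기 높이를 기록한다
--         result = binary_search(target, mid + 1, end, rice_cakes)
--         return result if result else mid
--
-- def binary_search(target, start, end, rice_cakes):
--     while start <= end: # 절단기를 조절할 수 있을 때까지 이진 탐색
--         parts_sum = 0
--         mid = (start + end) // 2
--
--         for rc in rice_cakes:
--             if rc > mid: # 떡들을 절단기로 자르고 남은 부분들의 총 길이를 구한다
--                 parts_sum += rc - mid
--
--         # 요구한 길이보다 적게 남은 경우 절단기 높이를 줄인다(좌측에 대해 이진 탐색)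
--         if target > parts_sum:
--             end = mid -1
--         else: # 요구한 길이보다 많이 남은 경우 절단기 높이를 높인다(우측에 대해 이진 탐색)
--             result = mid # 요구한 길이와 같거나 많이 남아야 하므로 절단기 높이를 기록한다
--             start = mid + 1
--
--     return result
-- ===== SOURCE B (Python) =====
-- def recur_binary_search(target, start, end, rice_cakes):
--     # Direct solve: sort descending, scan cut-counts k with a running prefix sum;
--     # the greatest height cutting exactly k cakes to total >= target is (S_k - target) // k.
--     if start > end:
--         return None
--     cakes = sorted(rice_cakes, reverse=True)
--     n = len(cakes)
--     if target <= 0: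
--         return end
--     s = 0
--     h = None
--     for k in range(1, n + 1):
--         s += cakes[k - 1]
--         hk = (s - target) // k
--         if k == n or cakes[k] <= hk:
--             h = hk
--             break
--     if h is None or h < start:
--         return None
--     return min(h, end)
-- ===== Notes on version B (the rewrite author's own statement) =====
-- stated objective: alternative
-- what changed: Replaces the height binary search (an O(n) cut-sum per probe) by a single descending sort plus one prefix-sum scan over cut-counts k, reading the answer height off in closed form as (S_k - target)//k at the first feasible k.
-- intended difference: When the searched range straddles 0 with midpoint below -1 and the exact best height on the upper half is 0, A's 'result if result else mid' treats the recorded height 0 as falsy and returns the negative midpoint, while B returns the intended best height 0. — e.g. on recur_binary_search(1, -3, 1, [1]): A returns some (-1), B returns some 0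
import Mathlib
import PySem

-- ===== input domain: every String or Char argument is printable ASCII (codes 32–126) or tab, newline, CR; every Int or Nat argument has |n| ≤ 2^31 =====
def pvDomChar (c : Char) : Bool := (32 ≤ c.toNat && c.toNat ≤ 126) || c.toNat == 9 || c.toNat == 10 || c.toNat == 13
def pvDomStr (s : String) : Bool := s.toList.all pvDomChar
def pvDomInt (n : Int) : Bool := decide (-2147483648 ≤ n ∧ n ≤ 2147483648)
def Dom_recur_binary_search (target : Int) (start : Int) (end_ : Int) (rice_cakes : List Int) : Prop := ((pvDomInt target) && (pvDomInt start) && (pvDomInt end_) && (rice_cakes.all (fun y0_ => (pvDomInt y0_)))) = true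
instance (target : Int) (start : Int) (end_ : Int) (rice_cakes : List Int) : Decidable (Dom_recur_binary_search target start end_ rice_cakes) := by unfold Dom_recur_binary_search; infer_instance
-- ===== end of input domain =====

-- B replaces A's height binary search by one descending sort plus a single prefix-sum scan over
-- cut-counts, reading the answer height off in closed form (objective: alternative algorithm).
-- A raises UnboundLocalError on many inputs (excluded by Pre_); on the D_ corner A returns a negative
-- midpoint where the best height is 0, because `result if result else mid` treats 0 as falsy.

-- ===== PORT A =====
-- fuel only makes the while-loop total; with the fuel recur_binary_search supplies it is never exhausted
def bsLoopA (target : Int) (cakes : List Int) : Nat → Int → Int → Option Int → Option Int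
  | 0, _, _, r => r
  | fuel + 1, s, e, r =>
    if s ≤ e then
      let mid := PySem.Int.floordiv (s + e) 2
      let parts_sum := cakes.foldl (fun acc rc => if mid < rc then acc + (rc - mid) else acc) 0
      if target > parts_sum then bsLoopA target cakes fuel s (mid - 1) r
      else bsLoopA target cakes fuel (mid + 1) e (some mid)
    else r

def recur_binary_search (target : Int) (start : Int) (end_ : Int) (rice_cakes : List Int) : Option Int :=
  if start > end_ then none
  else
    let mid := PySem.Int.floordiv (start + end_) 2
    let parts_sum := ((rice_cakes.filter (fun rc => decide (mid < rc))).map (fun rc => rc - mid)).sum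
    if target > parts_sum then bsLoopA target rice_cakes (end_ + 1 - start).toNat start (mid - 1) none
    else
      match bsLoopA target rice_cakes (end_ + 1 - start).toNat (mid + 1) end_ none with
      | none => none            -- Python raises UnboundLocalError here; outside Pre_
      | some v => some (if v = 0 then mid else v)   -- `result if result else mid`: 0 is falsy

-- ===== PORT B =====
-- fuel only makes the for-loop total; recur_binary_search_alt supplies len(cakes), never exhausted
def scanB (target : Int) (cakes : List Int) : Nat → Int → Int → Int → Option Int
  | 0, _, _, _ => none
  | fuel + 1, n, k, s =>
    if k ≤ n then
      let s' := s + PySem.List.pyGetD cakes (k - 1) 0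
      let hk' := PySem.Int.floordiv (s' - target) k
      if k = n ∨ PySem.List.pyGetD cakes k 0 ≤ hk' then some hk'
      else scanB target cakes fuel n (k + 1) s'
    else none

def recur_binary_search_alt (target : Int) (start : Int) (end_ : Int) (rice_cakes : List Int) : Option Int :=
  if start > end_ then none
  else
    let cakes := PySem.List.sorted rice_cakes (fun x => x) true
    let n := PySem.List.len cakes
    if target ≤ 0 then some end_
    else
      match scanB target cakes cakes.length n 1 0 with
      | none => none
      | some h => if h < start then none else some (min h end_)

-- ===== PRECONDITION & SPEC =====
-- total length left after cutting at height h (used by Pre_ and D_ only)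
def cutSum (h : Int) (xs : List Int) : Int :=
  ((xs.filter (fun rc => decide (h < rc))).map (fun rc => rc - h)).sum

-- Pre_ = exactly the inputs where A returns: either the empty range (A returns None), or the half
-- A recurses into is non-empty and its lowest height still leaves at least `target`; everywhere else
-- A's binary_search ends without ever assigning `result` and raises UnboundLocalError.
def Pre_recur_binary_search (target : Int) (start : Int) (end_ : Int) (rice_cakes : List Int) : Prop :=
  start > end_ ∨
    (if target ≤ cutSum (PySem.Int.floordiv (start + end_) 2) rice_cakes
     then PySem.Int.floordiv (start + end_) 2 + 1 ≤ end_ ∧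
          target ≤ cutSum (PySem.Int.floordiv (start + end_) 2 + 1) rice_cakes
     else start ≤ PySem.Int.floordiv (start + end_) 2 - 1 ∧ target ≤ cutSum start rice_cakes)

instance (target : Int) (start : Int) (end_ : Int) (rice_cakes : List Int) : Decidable (Pre_recur_binary_search target start end_ rice_cakes) := by unfold Pre_recur_binary_search; infer_instance

def pvWitness_recur_binary_search : Int × Int × Int × List Int := (6, 1, 19, [19, 15, 10, 17])

-- When the searched range straddles 0 with midpoint below -1 and the best height on the upper half
-- is 0, A's `result if result else mid` treats the recorded height 0 as falsy and returns the
-- negative midpoint, while B returns the intended best height 0.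
-- input measures used by D_ only: total length of the parts above height 0 / height 1
def partsAbove0 (xs : List Int) : Int := (xs.map (fun x => max x 0)).sum
def partsAbove1 (xs : List Int) : Int := (xs.map (fun x => max (x - 1) 0)).sum

def D_recur_binary_search (target : Int) (start : Int) (end_ : Int) (rice_cakes : List Int) : Prop :=
  start ≤ end_ ∧ PySem.Int.floordiv (start + end_) 2 + 1 ≤ 0 ∧ 0 ≤ end_ ∧
  target ≤ partsAbove0 rice_cakes ∧ (end_ = 0 ∨ partsAbove1 rice_cakes < target)

instance (target : Int) (start : Int) (end_ : Int) (rice_cakes : List Int) : Decidable (D_recur_binary_search target start end_ rice_cakes) := by unfold D_recur_binary_search; infer_instance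

def Spec_recur_binary_search (target : Int) (start : Int) (end_ : Int) (rice_cakes : List Int) (out : Option Int) : Prop := ¬ D_recur_binary_search target start end_ rice_cakes → out = recur_binary_search_alt target start end_ rice_cakes
instance (target : Int) (start : Int) (end_ : Int) (rice_cakes : List Int) (out : Option Int) : Decidable (Spec_recur_binary_search target start end_ rice_cakes out) := by unfold Spec_recur_binary_search; infer_instance

def pvDiffWitness_recur_binary_search : Int × Int × Int × List Int := (1, -3, 1, [1])
def pvDiffWitnessOut_recur_binary_search : (Option Int) × (Option Int) := (some (-1), some 0)

-- ===== CLAIM (what is proved, stated in full; the proofs are below) =====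
def Claim_unchanged_recur_binary_search : Prop := ∀ (target : Int) (start : Int) (end_ : Int) (rice_cakes : List Int), Dom_recur_binary_search target start end_ rice_cakes → Pre_recur_binary_search target start end_ rice_cakes → Spec_recur_binary_search target start end_ rice_cakes (recur_binary_search target start end_ rice_cakes)
def Claim_changed_recur_binary_search : Prop := Dom_recur_binary_search (pvDiffWitness_recur_binary_search.1) (pvDiffWitness_recur_binary_search.2.1) (pvDiffWitness_recur_binary_search.2.2.1) (pvDiffWitness_recur_binary_search.2.2.2) ∧ Pre_recur_binary_search (pvDiffWitness_recur_binary_search.1) (pvDiffWitness_recur_binary_search.2.1) (pvDiffWitness_recur_binary_search.2.2.1) (pvDiffWitness_recur_binary_search.2.2.2) ∧ D_recur_binary_search (pvDiffWitness_recur_binary_search.1) (pvDiffWitness_recur_binary_search.2.1) (pvDiffWitness_recur_binary_search.2.2.1) (pvDiffWitness_recur_binary_search.2.2.2) ∧ recur_binary_search (pvDiffWitness_recur_binary_search.1) (pvDiffWitness_recur_binary_search.2.1) (pvDiffWitness_recur_binary_search.2.2.1) (pvDiffWitness_recur_binary_search.2.2.2) = pvDiffWitnessOut_recur_binary_search.1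 ∧ recur_binary_search_alt (pvDiffWitness_recur_binary_search.1) (pvDiffWitness_recur_binary_search.2.1) (pvDiffWitness_recur_binary_search.2.2.1) (pvDiffWitness_recur_binary_search.2.2.2) = pvDiffWitnessOut_recur_binary_search.2 ∧ pvDiffWitnessOut_recur_binary_search.1 ≠ pvDiffWitnessOut_recur_binary_search.2
def Claim_exact_recur_binary_search : Prop := ∀ (target : Int) (start : Int) (end_ : Int) (rice_cakes : List Int), Dom_recur_binary_search target start end_ rice_cakes → Pre_recur_binary_search target start end_ rice_cakes → D_recur_binary_search target start end_ rice_cakes → recur_binary_search target start end_ rice_cakes ≠ recur_binary_search_alt target start end_ rice_cakes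
-- ===== LEMMAS AND PROOFS =====

-- predicate "cutting at height h still leaves at least target"
def PA (target : Int) (cakes : List Int) (h : Int) : Bool := decide (target ≤ cutSum h cakes)

-- greatest h in [s,e] with P h (junk s-1 if none); proof-side only
def gmax (P : Int → Bool) (s e : Int) : Int :=
  if _h : e < s then s - 1
  else if P e then e else gmax P s (e - 1)
termination_by (e + 1 - s).toNat
decreasing_by omega

lemma cutSum_eq_map (h : Int) (xs : List Int) :
    cutSum h xs = (xs.map (fun rc => if h < rc then rc - h else 0)).sum := by
  induction xs with
  | nil => rfl
  | cons x t ih =>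
    simp only [cutSum, List.filter_cons, List.map_cons, List.sum_cons] at *
    by_cases hx : h < x <;> simp [hx, ih]

lemma cutSum_nonneg (h : Int) (xs : List Int) : 0 ≤ cutSum h xs := by
  rw [cutSum_eq_map]
  apply List.sum_nonneg
  intro x hx
  simp only [List.mem_map] at hx
  obtain ⟨rc, _, rfl⟩ := hx
  split_ifs with h1 <;> omega

lemma cutSum_antitone {a b : Int} (hab : a ≤ b) (xs : List Int) :
    cutSum b xs ≤ cutSum a xs := by
  rw [cutSum_eq_map, cutSum_eq_map]
  induction xs with
  | nil => simp
  | cons x t ih =>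
    simp only [List.map_cons, List.sum_cons]
    have : (if b < x then x - b else 0) ≤ (if a < x then x - a else 0) := by
      split_ifs <;> omega
    omega

lemma cutSum_perm {xs ys : List Int} (hp : xs.Perm ys) (h : Int) :
    cutSum h xs = cutSum h ys := by
  unfold cutSum
  exact ((hp.filter _).map _).sum_eq

lemma foldl_cutSum (m : Int) (xs : List Int) : ∀ c : Int,
    xs.foldl (fun acc rc => if m < rc then acc + (rc - m) else acc) c = c + cutSum m xs := by
  induction xs with
  | nil => intro c; simp [cutSum]
  | cons x t ih =>
    intro c
    simp only [List.foldl_cons]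
    rw [ih, cutSum_eq_map, cutSum_eq_map]
    simp only [List.map_cons, List.sum_cons]
    split_ifs with hx <;> ring

lemma sorted_getElem_le {d : List Int} (hs : d.Pairwise (· ≥ ·)) {i j : Nat}
    (hij : i ≤ j) (hj : j < d.length) : d[j] ≤ d[i] := by
  rcases Nat.eq_or_lt_of_le hij with rfl | hlt
  · exact le_refl _
  · exact (List.pairwise_iff_getElem.mp hs) i j (by omega) hj hlt

lemma countP_ge_of_gt {d : List Int} (hs : d.Pairwise (· ≥ ·)) {j : Nat} (h : Int)
    (hj : j < d.length) (hgt : h < d[j]) :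
    j + 1 ≤ d.countP (fun x => decide (h < x)) := by
  have hall : ∀ x ∈ d.take (j+1), (fun x => decide (h < x)) x = true := by
    intro x hx
    obtain ⟨i, hlt, rfl⟩ := List.mem_take_iff_getElem.mp hx
    have : d[j] ≤ d[i] := sorted_getElem_le hs (by omega) hj
    simp only [decide_eq_true_eq]; omega
  conv_rhs => rw [← List.take_append_drop (j+1) d]
  rw [List.countP_append, List.countP_eq_length.mpr hall, List.length_take]
  omega

lemma countP_le_of_le {d : List Int} (hs : d.Pairwise (· ≥ ·)) {j : Nat} (h : Int)
    (hj : j < d.length) (hle : d[j] ≤ h) :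
    d.countP (fun x => decide (h < x)) ≤ j := by
  have hzero : (d.drop j).countP (fun x => decide (h < x)) = 0 := by
    rw [List.countP_eq_zero]
    intro x hx
    obtain ⟨i, hlt, rfl⟩ := List.mem_iff_getElem.mp hx
    have hji : j + i < d.length := by simp [List.length_drop] at hlt; omega
    have hd : (d.drop j)[i] = d[j + i] := List.getElem_drop ..
    rw [hd]
    have : d[j + i] ≤ d[j] := sorted_getElem_le hs (by omega) hji
    simp only [decide_eq_true_eq, not_lt]; omega
  conv_lhs => rw [← List.take_append_drop j d]
  rw [List.countP_append, hzero]
  have := List.countP_le_length (l := d.take j) (p := fun x => decide (h < x))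
  simp [List.length_take] at this ⊢
  omega

lemma cutSum_eq_take {d : List Int} (hs : d.Pairwise (· ≥ ·)) (h : Int) :
    cutSum h d = (d.take (d.countP (fun x => decide (h < x)))).sum
      - (d.countP (fun x => decide (h < x)) : Int) * h := by
  induction d with
  | nil => simp [cutSum]
  | cons x t ih =>
    have hx : ∀ y ∈ t, y ≤ x := fun y hy => (List.pairwise_cons.mp hs).1 y hy
    have ht := (List.pairwise_cons.mp hs).2
    by_cases hc : h < x
    · rw [List.countP_cons_of_pos (pa := by simpa)]
      simp only [cutSum, List.filter_cons, if_pos (by simpa : decide (h < x) = true),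
        List.map_cons, List.sum_cons] at *
      rw [List.take_succ_cons, List.sum_cons, ih ht]
      push_cast
      ring
    · have hzero : (x :: t).countP (fun x => decide (h < x)) = 0 := by
        rw [List.countP_eq_zero]
        intro y hy
        simp only [decide_eq_true_eq, not_lt]
        rcases List.mem_cons.mp hy with rfl | hyt
        · omega
        · have := hx y hyt; omega
      rw [hzero]
      have hfilter : (x :: t).filter (fun rc => decide (h < rc)) = [] := by
        rw [List.filter_eq_nil_iff]
        intro y hy
        simp only [decide_eq_true_eq, not_lt]
        rcases List.mem_cons.mp hy with rfl | hyt
        · omega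
        · have := hx y hyt; omega
      simp [cutSum, hfilter]

lemma cutSum_append (h : Int) (l1 l2 : List Int) :
    cutSum h (l1 ++ l2) = cutSum h l1 + cutSum h l2 := by
  simp [cutSum, List.filter_append]

lemma cutSum_all {h : Int} {l : List Int} (hall : ∀ x ∈ l, h < x) :
    cutSum h l = l.sum - (l.length : Int) * h := by
  induction l with
  | nil => simp [cutSum]
  | cons x t ih =>
    have hx : h < x := hall x (List.mem_cons_self ..)
    simp only [cutSum, List.filter_cons, if_pos (by simpa : decide (h < x) = true),
      List.map_cons, List.sum_cons] at *
    rw [ih (fun y hy => hall y (List.mem_cons_of_mem _ hy))]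
    simp only [List.length_cons]
    push_cast
    ring

lemma floordiv_one (a : Int) : PySem.Int.floordiv a 1 = a := by
  rw [PySem.Int.floordiv_eq_ediv_of_pos (by norm_num)]; simp

lemma trigger_spec {target : Int} {d : List Int} (hs : d.Pairwise (· ≥ ·)) (ht : 1 ≤ target)
    {j : Nat} (hj : j < d.length)
    (hNT : ∀ i : Nat, i < j → ∀ _hi : i + 1 < d.length,
        PySem.Int.floordiv ((d.take (i+1)).sum - target) ((i : Int) + 1) < d[i+1])
    (htrig : j + 1 = d.length ∨ ∃ _hj1 : j + 1 < d.length,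
        d[j+1] ≤ PySem.Int.floordiv ((d.take (j+1)).sum - target) ((j : Int) + 1)) :
    target ≤ cutSum (PySem.Int.floordiv ((d.take (j+1)).sum - target) ((j : Int) + 1)) d ∧
    cutSum (PySem.Int.floordiv ((d.take (j+1)).sum - target) ((j : Int) + 1) + 1) d < target := by
  have hjpos : (0:Int) < (j:Int) + 1 := by positivity
  set S := (d.take (j+1)).sum with hSdef
  set hk := PySem.Int.floordiv (S - target) ((j : Int) + 1) with hkdef
  -- M1 : hk < d[j]
  have hM1 : hk < d[j] := by
    cases j with
    | zero =>
      have hS1 : S = d[0] := by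
        rw [hSdef, List.sum_take_succ d 0 hj]; simp
      rw [hkdef, hS1]
      simp only [Nat.cast_zero, zero_add]
      rw [floordiv_one]
      omega
    | succ i =>
      by_contra hcon
      push_neg at hcon
      have h1 : d[i+1] * ((i:Int) + 1 + 1) ≤ S - target :=
        (PySem.Int.le_floordiv_iff_mul_le hjpos).mp (le_trans hcon (le_refl hk)) |>.trans_eq rfl
      have hS2 : S = (d.take (i+1)).sum + d[i+1] := by
        rw [hSdef]; exact List.sum_take_succ d (i+1) hj
      have hexp : d[i+1] * ((i:Int) + 1 + 1) = d[i+1] * ((i:Int) + 1) + d[i+1] := by ring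
      have h2 : d[i+1] * ((i:Int) + 1) ≤ (d.take (i+1)).sum - target := by linarith
      have hpos' : (0:Int) < (i:Int) + 1 := by positivity
      have h3 : (d[i+1] : Int) ≤ PySem.Int.floordiv ((d.take (i+1)).sum - target) ((i:Int) + 1) :=
        (PySem.Int.le_floordiv_iff_mul_le hpos').mpr h2
      have h4 := hNT i (by omega) hj
      omega
  -- M2 : target ≤ cutSum hk d
  have hfl : hk * ((j:Int) + 1) ≤ S - target :=
    (PySem.Int.le_floordiv_iff_mul_le hjpos).mp le_rfl
  have htake_gt : ∀ x ∈ d.take (j+1), hk < x := by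
    intro x hx
    obtain ⟨i, hlt, rfl⟩ := List.mem_take_iff_getElem.mp hx
    have : d[j] ≤ d[i] := sorted_getElem_le hs (by omega) hj
    omega
  have hM2 : target ≤ cutSum hk d := by
    have hsplit : cutSum hk d = cutSum hk (d.take (j+1)) + cutSum hk (d.drop (j+1)) := by
      conv_lhs => rw [← List.take_append_drop (j+1) d]
      exact cutSum_append hk _ _
    have hall := cutSum_all htake_gt
    have hlen : (d.take (j+1)).length = j + 1 := by
      rw [List.length_take]; omega
    have hnn := cutSum_nonneg hk (d.drop (j+1))
    rw [hsplit, hall, hlen]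
    push_cast
    linarith
  refine ⟨hM2, ?_⟩
  -- M3 : cutSum (hk+1) d < target
  set h' := hk + 1 with h'def
  set m := d.countP (fun x => decide (h' < x)) with hm
  have hmle : m ≤ j + 1 := by
    rcases htrig with hT | ⟨hj1, hT⟩
    · have := List.countP_le_length (p := fun x => decide (h' < x)) (l := d)
      omega
    · exact countP_le_of_le hs h' hj1 (by omega)
  have hcs : cutSum h' d = (d.take m).sum - (m : Int) * h' := cutSum_eq_take hs h'
  have hflu : S - target < h' * ((j:Int) + 1) :=
    (PySem.Int.floordiv_lt_iff_lt_mul hjpos).mp (by omega)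
  rcases Nat.eq_or_lt_of_le hmle with hmeq | hmlt
  · rw [hcs, hmeq, ← hSdef]
    push_cast
    linarith
  · rcases Nat.eq_zero_or_pos m with hm0 | hmpos
    · rw [hcs, hm0]
      simp
      omega
    · have hmlen : m < d.length := by omega
      have hdm : d[m] ≤ h' := by
        by_contra hx
        push_neg at hx
        have := countP_ge_of_gt hs h' hmlen hx
        omega
      obtain ⟨i, hieq⟩ : ∃ i, m = i + 1 := ⟨m - 1, by omega⟩
      have hnt := hNT i (by omega) (by omega : i + 1 < d.length)
      have hpos' : (0:Int) < (i:Int) + 1 := by positivity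
      have hlt : (d.take (i+1)).sum - target < h' * ((i:Int) + 1) := by
        apply (PySem.Int.floordiv_lt_iff_lt_mul hpos').mp
        simp only [hieq] at hdm
        omega
      rw [hcs, hieq]
      push_cast
      linarith


lemma gmax_true {P : Int → Bool} {s e : Int} (hse : s ≤ e) (hPe : P e = true) :
    gmax P s e = e := by
  rw [gmax, dif_neg (by omega)]
  simp [hPe]

lemma gmax_skip_top {P : Int → Bool} {s m : Int} :
    ∀ (fuel : Nat) (e : Int), (e - (m - 1)).toNat ≤ fuel → m - 1 ≤ e →
    (∀ k, m ≤ k → k ≤ e → P k = false) → gmax P s e = gmax P s (m - 1) := by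
  intro fuel
  induction fuel with
  | zero =>
    intro e hf he _
    have : e = m - 1 := by omega
    subst this; rfl
  | succ n ih =>
    intro e hf he hnone
    rcases eq_or_lt_of_le he with heq | hlt
    · rw [← heq]
    · by_cases hes : e < s
      · rw [gmax, dif_pos hes, gmax, dif_pos (by omega)]
      · rw [gmax, dif_neg (by omega), if_neg (by simp [hnone e (by omega) le_rfl])]
        exact ih (e - 1) (by omega) (by omega) (fun k hk1 hk2 => hnone k hk1 (by omega))

lemma gmax_raise_bot {P : Int → Bool} {s s' : Int} (hss' : s ≤ s') (hPs' : P s' = true) :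
    ∀ (fuel : Nat) (e : Int), (e - s').toNat ≤ fuel → s' ≤ e → gmax P s e = gmax P s' e := by
  intro fuel
  induction fuel with
  | zero =>
    intro e hf he
    have : e = s' := by omega
    subst this
    rw [gmax_true hss' hPs', gmax_true le_rfl hPs']
  | succ n ih =>
    intro e hf he
    by_cases hPe : P e = true
    · rw [gmax_true (by omega) hPe, gmax_true he hPe]
    · rcases eq_or_lt_of_le he with heq | hlt
      · subst heq; exact absurd hPs' hPe
      · rw [gmax, dif_neg (by omega), if_neg (by simpa using hPe)]
        conv_rhs => rw [gmax, dif_neg (by omega), if_neg (by simpa using hPe)]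
        exact ih (e - 1) (by omega) (by omega)

lemma gmax_eq_min {P : Int → Bool} {hstar : Int} (hchar : ∀ x, P x = true ↔ x ≤ hstar) {s : Int}
    (hsh : s ≤ hstar) :
    ∀ (fuel : Nat) (e : Int), (e - s).toNat ≤ fuel → s ≤ e → gmax P s e = min hstar e := by
  intro fuel
  induction fuel with
  | zero =>
    intro e hf he
    have hes : e = s := by omega
    rw [hes, gmax_true le_rfl ((hchar s).mpr hsh)]
    omega
  | succ n ih =>
    intro e hf he
    by_cases hPe : P e = true
    · rw [gmax_true he hPe]
      have := (hchar e).mp hPe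
      omega
    · have hehs : hstar < e := by
        by_contra hx
        exact hPe ((hchar e).mpr (by omega))
      have hse1 : s ≤ e - 1 := by omega
      rw [gmax, dif_neg (by omega), if_neg (by simpa using hPe)]
      rw [ih (e - 1) (by omega) hse1]
      omega

lemma bsLoopA_char (target : Int) (cakes : List Int) :
    ∀ (fuel : Nat) (s e : Int) (r : Option Int), (e + 1 - s).toNat ≤ fuel →
    bsLoopA target cakes fuel s e r =
      if s ≤ e ∧ target ≤ cutSum s cakes then some (gmax (PA target cakes) s e) else r := by
  intro fuel
  induction fuel with
  | zero =>
    intro s e r hf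
    rw [bsLoopA, if_neg (by omega : ¬(s ≤ e ∧ target ≤ cutSum s cakes))]
  | succ n ih =>
    intro s e r hf
    rw [bsLoopA]
    by_cases hse : s ≤ e
    · rw [if_pos hse]
      have hb := PySem.Int.floordiv_two_mid_bounds hse
      set mid := PySem.Int.floordiv (s + e) 2 with hmid
      simp only [foldl_cutSum, zero_add]
      by_cases htg : target > cutSum mid cakes
      · rw [if_pos htg, ih s (mid - 1) r (by omega)]
        by_cases hPs : target ≤ cutSum s cakes
        · have hsm : s ≠ mid := by
            intro hq; rw [hq] at hPs; omega
          rw [if_pos ⟨by omega, hPs⟩, if_pos ⟨hse, hPs⟩]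
          congr 1
          have := gmax_skip_top (P := PA target cakes) (s := s) (m := mid)
            (e - (mid - 1)).toNat e le_rfl (by omega)
            (fun k hk1 hk2 => by
              simp only [PA, decide_eq_false_iff_not, not_le]
              have := cutSum_antitone hk1 cakes
              omega)
          exact this.symm
        · rw [if_neg (show ¬(s ≤ mid - 1 ∧ target ≤ cutSum s cakes) by tauto),
              if_neg (show ¬(s ≤ e ∧ target ≤ cutSum s cakes) by tauto)]
      · rw [if_neg htg, ih (mid + 1) e (some mid) (by omega)]
        push_neg at htg
        have hPmid : PA target cakes mid = true := by simp [PA, htg]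
        have hPs : target ≤ cutSum s cakes :=
          le_trans htg (cutSum_antitone hb.1 cakes)
        by_cases hup : mid + 1 ≤ e ∧ target ≤ cutSum (mid + 1) cakes
        · rw [if_pos hup, if_pos ⟨hse, hPs⟩]
          congr 1
          exact (gmax_raise_bot (by omega) (by simp [PA, hup.2]) (e - (mid + 1)).toNat e le_rfl hup.1).symm
        · rw [if_neg hup, if_pos ⟨hse, hPs⟩]
          congr 1
          rcases not_and_or.mp hup with hgt | hnP
          · have hme : mid = e := by omega
            rw [hme] at hPmid ⊢
            exact (gmax_true hse hPmid).symm
          · push_neg at hnP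
            have h1 : gmax (PA target cakes) s e = gmax (PA target cakes) s mid := by
              have := gmax_skip_top (P := PA target cakes) (s := s) (m := mid + 1)
                (e - mid).toNat e (by omega) (by omega)
                (fun k hk1 hk2 => by
                  simp only [PA, decide_eq_false_iff_not, not_le]
                  have := cutSum_antitone hk1 cakes
                  omega)
              simpa using this
            rw [h1]
            exact (gmax_true hb.1 hPmid).symm
    · rw [if_neg hse, if_neg (show ¬(s ≤ e ∧ target ≤ cutSum s cakes) by tauto)]

lemma scanB_main (target : Int) (d : List Int) (hs : d.Pairwise (· ≥ ·)) (ht : 1 ≤ target) :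
    ∀ (fuel : Nat) (j : Nat), d.length - j ≤ fuel → j < d.length →
    (∀ i : Nat, i < j → ∀ _hi : i + 1 < d.length,
        PySem.Int.floordiv ((d.take (i+1)).sum - target) ((i : Int) + 1) < d[i+1]) →
    ∃ h, scanB target d fuel (d.length : Int) ((j : Int) + 1) ((d.take j).sum) = some h ∧
         target ≤ cutSum h d ∧ cutSum (h + 1) d < target := by
  intro fuel
  induction fuel with
  | zero => intro j hfj hj _; omega
  | succ n ih =>
    intro j hfj hj hNT
    rw [scanB]
    rw [if_pos (show ((j:Int) + 1) ≤ (d.length : Int) by exact_mod_cast hj)]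
    have hid1 : ((j:Int) + 1 - 1) = (j:Int) := by ring
    have hidx : PySem.List.pyGetD d ((j:Int) + 1 - 1) 0 = d[j] := by
      rw [hid1, PySem.List.pyGetD_natCast, List.getD_eq_getElem]
    simp only [hidx]
    have hS : (d.take j).sum + d[j] = (d.take (j+1)).sum := (List.sum_take_succ d j hj).symm
    simp only [hS]
    by_cases hT1 : j + 1 = d.length
    · rw [if_pos (Or.inl (by exact_mod_cast hT1))]
      exact ⟨_, rfl, trigger_spec hs ht hj hNT (Or.inl hT1)⟩
    · have hj1 : j + 1 < d.length := by omega
      have hget : PySem.List.pyGetD d ((j:Int) + 1) 0 = d[j+1] := by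
        have hc1 : ((j:Int) + 1) = ((j+1 : Nat) : Int) := by push_cast; ring
        rw [hc1, PySem.List.pyGetD_natCast, List.getD_eq_getElem]
      by_cases hc : d[j+1] ≤ PySem.Int.floordiv ((d.take (j+1)).sum - target) ((j:Int) + 1)
      · rw [if_pos (Or.inr (by rw [hget]; exact hc))]
        exact ⟨_, rfl, trigger_spec hs ht hj hNT (Or.inr ⟨hj1, hc⟩)⟩
      · rw [if_neg (by
          rw [hget]
          push_neg
          constructor
          · intro hq
            exact hT1 (by exact_mod_cast hq)
          · exact lt_of_not_ge hc)]
        have hNT' : ∀ i : Nat, i < j + 1 → ∀ _hi : i + 1 < d.length,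
            PySem.Int.floordiv ((d.take (i+1)).sum - target) ((i : Int) + 1) < d[i+1] := by
          intro i hi hi1
          rcases Nat.lt_or_ge i j with hij | hij
          · exact hNT i hij hi1
          · have hieq : i = j := by omega
            subst hieq
            exact lt_of_not_ge hc
        have hcast : ((j:Int) + 1 + 1) = (((j+1 : Nat)) : Int) + 1 := by push_cast; ring
        rw [hcast]
        exact ih (j+1) (by omega) hj1 hNT'


lemma partsAbove0_eq (xs : List Int) : partsAbove0 xs = cutSum 0 xs := by
  rw [cutSum_eq_map]
  unfold partsAbove0
  induction xs with
  | nil => rfl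
  | cons x t ih =>
    simp only [List.map_cons, List.sum_cons, ih]
    split_ifs with h <;> omega

lemma partsAbove1_eq (xs : List Int) : partsAbove1 xs = cutSum 1 xs := by
  rw [cutSum_eq_map]
  unfold partsAbove1
  induction xs with
  | nil => rfl
  | cons x t ih =>
    simp only [List.map_cons, List.sum_cons, ih]
    split_ifs with h <;> omega

lemma cutSum_def' (h : Int) (xs : List Int) :
    ((xs.filter (fun rc => decide (h < rc))).map (fun rc => rc - h)).sum = cutSum h xs := rfl

lemma B_eval {target start end_ : Int} {rice_cakes : List Int} (hse : start ≤ end_)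
    (ht : 1 ≤ target) (hne : ∃ x, target ≤ cutSum x rice_cakes) :
    ∃ h, recur_binary_search_alt target start end_ rice_cakes
        = (if h < start then none else some (min h end_)) ∧
      (∀ x, target ≤ cutSum x rice_cakes ↔ x ≤ h) := by
  have hnil : rice_cakes ≠ [] := by
    intro h0
    obtain ⟨x, hx⟩ := hne
    rw [h0] at hx
    simp [cutSum] at hx
    omega
  set d := PySem.List.sorted rice_cakes (fun x => x) true with hd
  have hperm : d.Perm rice_cakes := PySem.List.sorted_perm rice_cakes (fun x => x) true
  have hlen : d.length = rice_cakes.length := hperm.length_eq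
  have hlpos : 0 < d.length := by
    rw [hlen]
    exact List.length_pos_of_ne_nil hnil
  have hpw : d.Pairwise (· ≥ ·) := by
    simpa using PySem.List.sorted_pairwise_rev rice_cakes (fun x => x)
  obtain ⟨h, hscan, hP1, hP2⟩ := scanB_main target d hpw ht d.length 0 (by omega) hlpos
    (by intro i hi _; omega)
  simp only [Nat.cast_zero, zero_add, List.take_zero, List.sum_nil] at hscan
  have htr1 : cutSum h d = cutSum h rice_cakes := cutSum_perm hperm h
  have htr2 : cutSum (h+1) d = cutSum (h+1) rice_cakes := cutSum_perm hperm (h+1)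
  refine ⟨h, ?_, ?_⟩
  · simp only [recur_binary_search_alt, if_neg (show ¬ start > end_ by omega),
      if_neg (show ¬ target ≤ 0 by omega), PySem.List.len_eq, ← hd]
    rw [hscan]
  · intro x
    constructor
    · intro hx
      by_contra hgt
      push_neg at hgt
      have := cutSum_antitone (show h + 1 ≤ x by omega) rice_cakes
      omega
    · intro hx
      have := cutSum_antitone hx rice_cakes
      omega

-- ===== VERDICT =====
theorem recur_binary_search_spec : Claim_unchanged_recur_binary_search := by
  unfold Claim_unchanged_recur_binary_search
  intro target start end_ rice_cakes hDom hPre hnD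
  show recur_binary_search target start end_ rice_cakes
      = recur_binary_search_alt target start end_ rice_cakes
  by_cases hse : start ≤ end_
  swap
  · rw [recur_binary_search, if_pos (by omega), recur_binary_search_alt, if_pos (by omega)]
  · have hb := PySem.Int.floordiv_two_mid_bounds hse
    set m := PySem.Int.floordiv (start + end_) 2 with hm
    have hPre' : if target ≤ cutSum m rice_cakes
        then m + 1 ≤ end_ ∧ target ≤ cutSum (m + 1) rice_cakes
        else start ≤ m - 1 ∧ target ≤ cutSum start rice_cakes := by
      rcases hPre with habs | hp
      · omega
      · exact hp
    simp only [recur_binary_search, cutSum_def', ← hm, if_neg (show ¬ start > end_ by omega)]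
    by_cases hPm : target ≤ cutSum m rice_cakes
    · rw [if_neg (by omega)]
      rw [if_pos hPm] at hPre'
      rw [bsLoopA_char target rice_cakes _ (m+1) end_ none (by omega), if_pos ⟨hPre'.1, hPre'.2⟩]
      by_cases ht0 : target ≤ 0
      · have hPend : PA target rice_cakes end_ = true := by
          have := cutSum_nonneg end_ rice_cakes
          simp only [PA, decide_eq_true_eq]
          omega
        have hgv : gmax (PA target rice_cakes) (m+1) end_ = end_ := gmax_true hPre'.1 hPend
        have hend0 : end_ ≠ 0 := by
          intro h0
          apply hnD
          have := cutSum_nonneg 0 rice_cakes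
          exact ⟨hse, by omega, by omega, by rw [partsAbove0_eq]; omega, Or.inl h0⟩
        rw [hgv]
        rw [recur_binary_search_alt, if_neg (by omega), if_pos ht0]
        simp only [Option.some.injEq]
        rw [if_neg hend0]
      · have ht : 1 ≤ target := by omega
        obtain ⟨h, hBeq, hchar⟩ := B_eval hse ht ⟨m+1, hPre'.2⟩
        have hchar' : ∀ x, PA target rice_cakes x = true ↔ x ≤ h := by
          intro x
          simp only [PA, decide_eq_true_eq]
          exact hchar x
        have hmh : m + 1 ≤ h := (hchar (m+1)).mp hPre'.2
        have hgv : gmax (PA target rice_cakes) (m+1) end_ = min h end_ :=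
          gmax_eq_min hchar' hmh (end_ - (m+1)).toNat end_ (by omega) hPre'.1
        have hne0 : min h end_ ≠ 0 := by
          intro h0
          apply hnD
          refine ⟨hse, by omega, by omega, by rw [partsAbove0_eq]; exact (hchar 0).mpr (by omega), ?_⟩
          rcases eq_or_ne end_ 0 with he | he
          · exact Or.inl he
          · right
            rw [partsAbove1_eq]
            have hh0 : h = 0 := by omega
            by_contra hq
            push_neg at hq
            have := (hchar 1).mp hq
            omega
        rw [hBeq, if_neg (by omega), hgv]
        simp only [Option.some.injEq]
        rw [if_neg hne0]
    · rw [if_pos (by omega)]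
      rw [if_neg hPm] at hPre'
      have ht : 1 ≤ target := by
        have := cutSum_nonneg m rice_cakes
        omega
      rw [bsLoopA_char target rice_cakes _ start (m-1) none (by omega), if_pos ⟨hPre'.1, hPre'.2⟩]
      obtain ⟨h, hBeq, hchar⟩ := B_eval hse ht ⟨start, hPre'.2⟩
      have hchar' : ∀ x, PA target rice_cakes x = true ↔ x ≤ h := by
        intro x
        simp only [PA, decide_eq_true_eq]
        exact hchar x
      have hsh : start ≤ h := (hchar start).mp hPre'.2
      have hmh : h ≤ m - 1 := by
        have hq : ¬ (m ≤ h) := fun hq => hPm ((hchar m).mpr hq)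
        omega
      rw [hBeq, if_neg (by omega)]
      rw [gmax_eq_min hchar' hsh (m - 1 - start).toNat (m-1) (by omega) hPre'.1]
      congr 1
      omega

theorem recur_binary_search_changed : Claim_changed_recur_binary_search := by
  unfold Claim_changed_recur_binary_search
  refine ⟨by decide, by decide, by decide, ?_, ?_, by decide⟩
  · decide
  · decide

theorem recur_binary_search_tight : Claim_exact_recur_binary_search := by
  unfold Claim_exact_recur_binary_search
  intro target start end_ rice_cakes hDom hPre hD
  obtain ⟨hse, hm1, he0, hc0, hc1⟩ := hD
  rw [partsAbove0_eq] at hc0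
  rw [partsAbove1_eq] at hc1
  have hb := PySem.Int.floordiv_two_mid_bounds hse
  set m := PySem.Int.floordiv (start + end_) 2 with hm
  have hPm : target ≤ cutSum m rice_cakes :=
    le_trans hc0 (cutSum_antitone (show m ≤ 0 by omega) rice_cakes)
  have hPre' : m + 1 ≤ end_ ∧ target ≤ cutSum (m + 1) rice_cakes := by
    rcases hPre with habs | hp
    · omega
    · rwa [if_pos hPm] at hp
  simp only [recur_binary_search, cutSum_def', ← hm, if_neg (show ¬ start > end_ by omega),
    if_neg (show ¬ target > cutSum m rice_cakes by omega)]
  rw [bsLoopA_char target rice_cakes _ (m+1) end_ none (by omega), if_pos ⟨hPre'.1, hPre'.2⟩]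
  by_cases ht0 : target ≤ 0
  · have hend0 : end_ = 0 := by
      rcases hc1 with he | hlt
      · exact he
      · have := cutSum_nonneg 1 rice_cakes
        omega
    have hPend : PA target rice_cakes end_ = true := by
      have := cutSum_nonneg end_ rice_cakes
      simp only [PA, decide_eq_true_eq]
      omega
    have hgv : gmax (PA target rice_cakes) (m+1) end_ = end_ := gmax_true hPre'.1 hPend
    rw [hgv, recur_binary_search_alt, if_neg (by omega), if_pos ht0, hend0]
    intro hq
    simp at hq
    omega
  · have ht : 1 ≤ target := by omega
    obtain ⟨h, hBeq, hchar⟩ := B_eval hse ht ⟨0, hc0⟩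
    have hchar' : ∀ x, PA target rice_cakes x = true ↔ x ≤ h := by
      intro x
      simp only [PA, decide_eq_true_eq]
      exact hchar x
    have h0 : 0 ≤ h := (hchar 0).mp hc0
    have hup : h ≤ 0 ∨ end_ = 0 := by
      rcases hc1 with he | hlt
      · exact Or.inr he
      · left
        have hq : ¬ (1 ≤ h) := by
          intro h1
          have := (hchar 1).mpr h1
          omega
        omega
    have hmh : m + 1 ≤ h := (hchar (m+1)).mp hPre'.2
    have hmin0 : min h end_ = 0 := by omega
    have hgv : gmax (PA target rice_cakes) (m+1) end_ = min h end_ :=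
      gmax_eq_min hchar' hmh (end_ - (m+1)).toNat end_ (by omega) hPre'.1
    rw [hgv, hmin0, hBeq, if_neg (by omega), hmin0]
    intro hq
    simp at hq
    omega
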